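-- pv_equiv track=rewrite | github.com/NJManganelli/FourTopNAOD | RDF/scripts/HTResolutionStudy.py | cartesian_product_list
-- ===== SOURCE A (Python) =====
-- def cartesian_product_list(name_format="$NUM_$LET_$SYM", name_tuples=[("$NUM", ["1", "2"]), ("$LET", ["A", "B", "C"]), ("$SYM", ["*", "@"])]):
--     """Take as input a string <name_format> and list of tuples <name_tuple> where a cartesian product of the tuples is formed.
--     The tuples contain a key-string (also present in the name_format string) and value-list with the replacements to cycle through.
--     The last tuple is the innermost replacement in the list formed, regardless of placement in the name_format string."""
--     if 'copy' not in dir():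
--         try:
--             import copy
--         except:
--             raise RuntimeError("Could not import the copy module in method cartesianProductList")
--     if 'itertools' not in dir():
--         try:
--             import itertools
--         except:
--             raise RuntimeError("Could not import the itertools module in method cartesianProductList")
--     list_of_lists = []
--     list_of_keys = []
--     for k, v in name_tuples:
--         list_of_lists.append(v)
--         list_of_keys.append(k)
--     cart_prod = [zip(list_of_keys, l) for l in list(itertools.product(*list_of_lists))]
--     ret_list = []
--     for uzip in cart_prod:
--         nc = copy.copy(name_format)
--         for k, v in uzip:
--             nc = nc.replace(k, v)
--         ret_list.append(nc)
--     return ret_list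
-- ===== SOURCE B (Python) =====
-- def cartesian_product_list(name_format="$NUM_$LET_$SYM", name_tuples=[("$NUM", ["1", "2"]), ("$LET", ["A", "B", "C"]), ("$SYM", ["*", "@"])]):
--     ret = [name_format]
--     for key, values in name_tuples:
--         ret = [s.replace(key, val) for s in ret for val in values]
--     return ret
-- ===== Notes on version B (the rewrite author's own statement) =====
-- stated objective: simpler
-- what changed: Replaces the itertools.product-of-all-value-lists plus per-combination zip-and-replace loop by a single incremental expansion: start from [name_format] and for each (key, values) pair expand every string in the current list with each value, which drops itertools and copy entirely.
import Mathlib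
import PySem

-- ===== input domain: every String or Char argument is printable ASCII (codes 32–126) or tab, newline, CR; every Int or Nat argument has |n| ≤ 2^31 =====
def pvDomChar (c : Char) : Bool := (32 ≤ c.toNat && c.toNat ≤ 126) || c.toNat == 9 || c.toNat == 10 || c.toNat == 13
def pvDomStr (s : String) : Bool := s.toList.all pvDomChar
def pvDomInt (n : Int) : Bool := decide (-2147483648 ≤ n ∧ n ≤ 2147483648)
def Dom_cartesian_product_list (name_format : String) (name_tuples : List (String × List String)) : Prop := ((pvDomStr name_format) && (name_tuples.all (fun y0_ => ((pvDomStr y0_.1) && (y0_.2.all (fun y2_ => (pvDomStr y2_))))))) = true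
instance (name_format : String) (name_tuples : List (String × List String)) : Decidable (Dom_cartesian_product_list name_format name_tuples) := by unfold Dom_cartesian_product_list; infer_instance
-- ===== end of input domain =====

-- B replaces the itertools.product + zip-and-replace pipeline by an incremental one-key-at-a-time
-- expansion of the result list (objective: simpler).


-- ===== PORT A =====
-- itertools.product(*lists): first list outermost, last varies fastest
def pvProduct : List (List String) → List (List String)
  | [] => [[]]
  | l :: ls => l.flatMap (fun x => (pvProduct ls).map (fun t => x :: t))

def cartesian_product_list (name_format : String) (name_tuples : List (String × List String)) : List String :=
  -- for k, v in name_tuples: append v to list_of_lists, k to list_of_keys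
  let p := name_tuples.foldl (fun (acc : List (List String) × List String) kv =>
      (acc.1 ++ [kv.2], acc.2 ++ [kv.1])) ([], [])
  let list_of_lists := p.1
  let list_of_keys := p.2
  -- cart_prod = [zip(keys, l) for l in product(*lists)]
  let cart_prod := (pvProduct list_of_lists).map (fun l => list_of_keys.zip l)
  -- for uzip in cart_prod: nc = copy of name_format; sequential replaces; append
  cart_prod.foldl (fun ret_list uzip =>
    ret_list ++ [uzip.foldl (fun nc kv => PySem.Str.replace nc kv.1 kv.2) name_format]) []

-- ===== PORT B =====
def cartesian_product_list_alt (name_format : String) (name_tuples : List (String × List String)) : List String :=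
  name_tuples.foldl (fun ret kv =>
    ret.flatMap (fun s => kv.2.map (fun val => PySem.Str.replace s kv.1 val))) [name_format]

-- ===== PRECONDITION & SPEC =====
def Spec_cartesian_product_list (name_format : String) (name_tuples : List (String × List String)) (out : List String) : Prop := out = cartesian_product_list_alt name_format name_tuples
instance (name_format : String) (name_tuples : List (String × List String)) (out : List String) : Decidable (Spec_cartesian_product_list name_format name_tuples out) := by unfold Spec_cartesian_product_list; infer_instance

-- ===== CLAIM (what is proved, stated in full; the proofs are below) =====
def Claim_equal_cartesian_product_list : Prop := ∀ (name_format : String) (name_tuples : List (String × List String)), Dom_cartesian_product_list name_format name_tuples → Spec_cartesian_product_list name_format name_tuples (cartesian_product_list name_format name_tuples)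

-- ===== LEMMAS AND PROOFS =====

-- right-recursive description of the common result
def pvRec (s : String) : List (String × List String) → List String
  | [] => [s]
  | kv :: rest => kv.2.flatMap (fun v => pvRec (PySem.Str.replace s kv.1 v) rest)

-- A's first loop builds (map snd, map fst)
theorem pvPairLoop (nts : List (String × List String))
    (a : List (List String)) (b : List String) :
    nts.foldl (fun (acc : List (List String) × List String) kv =>
        (acc.1 ++ [kv.2], acc.2 ++ [kv.1])) (a, b)
      = (a ++ nts.map Prod.snd, b ++ nts.map Prod.fst) := by
  induction nts generalizing a b with
  | nil => simp
  | cons kv rest ih => simp [List.foldl, ih]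

-- A's output loop is a map
theorem pvOutLoop (g : List (String × String) → String)
    (xs : List (List (String × String))) (acc : List String) :
    xs.foldl (fun ret u => ret ++ [g u]) acc = acc ++ xs.map g := by
  induction xs generalizing acc with
  | nil => simp
  | cons x xs ih => simp [List.foldl, ih]

-- A's map-over-product equals pvRec
theorem pvA_rec (nts : List (String × List String)) (s : String) :
    (pvProduct (nts.map Prod.snd)).map
        (fun l => ((nts.map Prod.fst).zip l).foldl
          (fun nc kv => PySem.Str.replace nc kv.1 kv.2) s)
      = pvRec s nts := by
  induction nts generalizing s with
  | nil => simp [pvProduct, pvRec]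
  | cons kv rest ih =>
    simp only [List.map_cons, pvProduct, pvRec, List.map_flatMap]
    refine List.flatMap_congr ?_
    intro v _
    simpa [Function.comp, List.zip_cons_cons, List.foldl] using ih (PySem.Str.replace s kv.1 v)

-- B's foldl from any list equals flatMap of pvRec
theorem pvB_rec (nts : List (String × List String)) (ret : List String) :
    nts.foldl (fun ret kv =>
        ret.flatMap (fun s => kv.2.map (fun val => PySem.Str.replace s kv.1 val))) ret
      = ret.flatMap (fun s => pvRec s nts) := by
  induction nts generalizing ret with
  | nil => simp [pvRec]
  | cons kv rest ih =>
    simp only [List.foldl, ih, pvRec, List.flatMap_assoc]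
    refine List.flatMap_congr ?_
    intro s _
    simp [List.flatMap_map]

-- ===== VERDICT (by name: the statement is the Claim_ definition above) =====
theorem cartesian_product_list_spec : Claim_equal_cartesian_product_list := by
  intro nf nts _
  show cartesian_product_list nf nts = cartesian_product_list_alt nf nts
  simp only [cartesian_product_list, cartesian_product_list_alt, pvPairLoop, List.nil_append,
    pvOutLoop, pvB_rec]
  rw [List.map_map]
  simp only [List.flatMap_cons, List.flatMap_nil, List.append_nil]
  rw [← pvA_rec nts nf]
  rfl
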